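-- pv_equiv track=rewrite | github.com/Khaldosh249/ERPNextSallaIntegration | salla_integration/jobs/category_jobs.py | _sort_by_hierarchy
-- ===== SOURCE A (Python) =====
-- def _sort_by_hierarchy(categories: list) -> list:
--     """
--     Sort categories so parents come before children.
--
--     Args:
--         categories: List of category data
--
--     Returns:
--         Sorted list
--     """
--     # Build a map of category IDs to their data
--     category_map = {cat.get("id"): cat for cat in categories}
--
--     # Separate root categories and child categories
--     roots = []
--     children = []
--
--     for cat in categories:
--         parent_id = cat.get("parent_id")
--         if not parent_id or parent_id not in category_map:
--             roots.append(cat)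
--         else:
--             children.append(cat)
--
--     # Simple approach: roots first, then children
--     # For deeper hierarchies, would need recursive sorting
--     return roots + children
-- ===== SOURCE B (Python) =====
-- def _sort_by_hierarchy(categories: list) -> list:
--     """Roots-before-children via one stable sort on a binary key."""
--     ids = {cat.get("id") for cat in categories}
--     return sorted(
--         categories,
--         key=lambda cat: 0
--         if (not cat.get("parent_id") or cat.get("parent_id") not in ids)
--         else 1,
--     )
-- ===== Notes on version B (the rewrite author's own statement) =====
-- stated objective: idiomatic
-- what changed: Replaces the explicit roots/children bucketing loop plus concatenation by one stable sort of the list on a binary root/child key (0 for roots, 1 for children), relying on sort stability to preserve original order within each group.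
import Mathlib
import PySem

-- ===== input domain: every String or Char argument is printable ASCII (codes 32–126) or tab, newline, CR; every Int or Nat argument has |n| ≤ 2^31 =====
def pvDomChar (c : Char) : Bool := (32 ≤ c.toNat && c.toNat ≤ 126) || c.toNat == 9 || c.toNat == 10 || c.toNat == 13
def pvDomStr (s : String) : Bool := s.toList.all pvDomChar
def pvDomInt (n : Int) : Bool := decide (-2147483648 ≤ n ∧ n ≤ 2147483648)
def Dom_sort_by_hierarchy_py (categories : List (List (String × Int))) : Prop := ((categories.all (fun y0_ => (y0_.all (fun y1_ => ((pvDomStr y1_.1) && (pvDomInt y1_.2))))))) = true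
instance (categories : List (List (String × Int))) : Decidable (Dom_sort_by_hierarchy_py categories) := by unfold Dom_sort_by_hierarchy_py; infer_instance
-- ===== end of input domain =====

-- B replaces A's explicit roots/children bucketing-and-concatenate with one stable
-- sort on a binary root/child key (idiomatic; same classification predicate).

-- ===== PORT A =====
def sort_by_hierarchy_py (categories : List (List (String × Int))) : List (List (String × Int)) :=
  -- category_map = {cat.get("id"): cat for cat in categories}
  let category_map : PySem.Dict (Option Int) (List (String × Int)) :=
    categories.foldl (fun d cat => d.insert ((PySem.Dict.mk cat).get? "id") cat) PySem.Dict.empty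
  -- for cat in categories: roots.append / children.append
  let rc :=
    categories.foldl (fun rc cat =>
      let parent_id := (PySem.Dict.mk cat).get? "parent_id"
      -- "not parent_id" = parent_id is None or the falsy int 0
      if parent_id == none || parent_id == some 0 || !(category_map.contains parent_id)
      then (rc.1 ++ [cat], rc.2)
      else (rc.1, rc.2 ++ [cat]))
      (([], []) : List (List (String × Int)) × List (List (String × Int)))
  rc.1 ++ rc.2

-- ===== PORT B =====
def sort_by_hierarchy_py_alt (categories : List (List (String × Int))) : List (List (String × Int)) :=
  -- ids = {cat.get("id") for cat in categories}
  let ids : PySem.Set (Option Int) :=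
    PySem.Set.ofList (categories.map (fun cat => (PySem.Dict.mk cat).get? "id"))
  -- sorted(categories, key=lambda cat: 0 if (not pid or pid not in ids) else 1)
  PySem.List.sorted categories
    (fun cat =>
      let parent_id := (PySem.Dict.mk cat).get? "parent_id"
      if parent_id == none || parent_id == some 0 || !(ids.contains parent_id)
      then (0 : Int) else 1)
    false

-- ===== PRECONDITION & SPEC =====
def Spec_sort_by_hierarchy_py (categories : List (List (String × Int))) (out : List (List (String × Int))) : Prop := out = sort_by_hierarchy_py_alt categories
instance (categories : List (List (String × Int))) (out : List (List (String × Int))) : Decidable (Spec_sort_by_hierarchy_py categories out) := by unfold Spec_sort_by_hierarchy_py; infer_instance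

-- ===== CLAIM (what is proved, stated in full; the proofs are below) =====
def Claim_equal_sort_by_hierarchy_py : Prop := ∀ (categories : List (List (String × Int))), Dom_sort_by_hierarchy_py categories → Spec_sort_by_hierarchy_py categories (sort_by_hierarchy_py categories)

-- ===== LEMMAS AND PROOFS =====

-- Inserting x skips a prefix on which `before x ·` is false.
theorem insertBy_append_of_forall_false {α : Type} (before : α → α → Bool) (x : α)
    (as bs : List α) (h : ∀ a ∈ as, before x a = false) :
    PySem.List.insertBy before x (as ++ bs) = as ++ PySem.List.insertBy before x bs := by
  induction as with
  | nil => rfl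
  | cons a as ih =>
    simp only [List.cons_append, PySem.List.insertBy, h a (by simp)]
    simp only [Bool.false_eq_true, if_false, List.cons.injEq, true_and]
    exact ih (fun a ha => h a (by simp [ha]))

-- Inserting x into a list on which `before x ·` is everywhere false appends it.
theorem insertBy_eq_append_of_forall_false {α : Type} (before : α → α → Bool) (x : α)
    (bs : List α) (h : ∀ a ∈ bs, before x a = false) :
    PySem.List.insertBy before x bs = bs ++ [x] := by
  induction bs with
  | nil => rfl
  | cons b bs ih =>
    simp only [PySem.List.insertBy, h b (by simp)]
    simp only [Bool.false_eq_true, if_false, List.cons_append, List.cons.injEq, true_and]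
    exact ih (fun a ha => h a (by simp [ha]))

-- Stable insertion sort on a 0/1-valued key is the stable partition.
theorem foldl_insertBy_binary {α : Type} (key : α → Int)
    (hk : ∀ x, key x = 0 ∨ key x = 1) :
    ∀ (xs zs os : List α), (∀ a ∈ zs, key a = 0) → (∀ a ∈ os, key a = 1) →
      xs.foldl (fun acc x => PySem.List.insertBy (fun a b => decide (key a < key b)) x acc) (zs ++ os)
        = (zs ++ xs.filter (fun x => key x == 0)) ++ (os ++ xs.filter (fun x => key x == 1)) := by
  intro xs
  induction xs with
  | nil => intro zs os _ _; simp
  | cons x xs ih =>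
    intro zs os hz ho
    simp only [List.foldl_cons]
    rcases hk x with h0 | h1
    · have step : PySem.List.insertBy (fun a b => decide (key a < key b)) x (zs ++ os)
          = (zs ++ [x]) ++ os := by
        rw [insertBy_append_of_forall_false _ _ _ _
          (fun a ha => by simp [hz a ha, h0])]
        cases os with
        | nil => simp [PySem.List.insertBy]
        | cons o os' =>
          have : (fun a b => decide (key a < key b)) x o = true := by
            simp [h0, ho o (by simp)]
          simp [PySem.List.insertBy, this]
      rw [step, ih (zs ++ [x]) os
        (by intro a ha; rcases List.mem_append.1 ha with h | h
            · exact hz a h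
            · simp at h; simpa [h] using h0) ho]
      simp [h0]
    · have step : PySem.List.insertBy (fun a b => decide (key a < key b)) x (zs ++ os)
          = zs ++ (os ++ [x]) := by
        rw [insertBy_append_of_forall_false _ _ _ _
          (fun a ha => by simp [hz a ha, h1])]
        rw [insertBy_eq_append_of_forall_false _ _ _
          (fun a ha => by simp [ho a ha, h1])]
      rw [step, ih zs (os ++ [x]) hz
        (by intro a ha; rcases List.mem_append.1 ha with h | h
            · exact ho a h
            · simp at h; simpa [h] using h1)]
      simp [h1]

-- A's bucketing loop is the pair of filters.
theorem foldl_pair_append_if {α : Type} (p : α → Bool) :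
    ∀ (l : List α) (r c : List α),
      l.foldl (fun rc x => if p x then (rc.1 ++ [x], rc.2) else (rc.1, rc.2 ++ [x])) (r, c)
        = (r ++ l.filter p, c ++ l.filter (fun x => !(p x))) := by
  intro l
  induction l with
  | nil => intro r c; simp
  | cons x l ih =>
    intro r c
    by_cases h : p x = true
    · simp [List.foldl_cons, h, ih]
    · simp only [Bool.not_eq_true] at h
      simp [List.foldl_cons, h, ih]

-- The root test of A and of B agree: the dict's key set is exactly B's id set.
theorem rootTest_eq (categories : List (List (String × Int))) (k : Option Int) :
    (categories.foldl (fun d cat => d.insert ((PySem.Dict.mk cat).get? "id") cat)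
        (PySem.Dict.empty : PySem.Dict (Option Int) (List (String × Int)))).contains k
      = (PySem.Set.ofList (categories.map (fun cat => (PySem.Dict.mk cat).get? "id"))).contains k := by
  rw [PySem.Dict.contains_eq_decide_mem_keys,
      PySem.Dict.keys_foldl_insert_key categories (fun cat => (PySem.Dict.mk cat).get? "id")]
  show decide (k ∈ PySem.Set.update [] _) = _
  rw [PySem.Set.update_nil_left]
  simp [PySem.Set.contains]

-- ===== VERDICT (by name: the statement is the Claim_ definition above) =====
theorem sort_by_hierarchy_py_spec : Claim_equal_sort_by_hierarchy_py := by
  intro categories _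
  unfold Spec_sort_by_hierarchy_py sort_by_hierarchy_py sort_by_hierarchy_py_alt
  set key : List (String × Int) → Int := fun cat =>
    let parent_id := (PySem.Dict.mk cat).get? "parent_id"
    if parent_id == none || parent_id == some 0 ||
       !((PySem.Set.ofList (categories.map (fun cat => (PySem.Dict.mk cat).get? "id"))).contains parent_id)
    then (0 : Int) else 1 with hkey
  have hk : ∀ x, key x = 0 ∨ key x = 1 := by
    intro x
    simp only [hkey]
    by_cases h : ((PySem.Dict.mk x).get? "parent_id" == none || (PySem.Dict.mk x).get? "parent_id" == some 0 ||
        !((PySem.Set.ofList (categories.map (fun cat => (PySem.Dict.mk cat).get? "id"))).contains ((PySem.Dict.mk x).get? "parent_id"))) = true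
    · left; exact if_pos h
    · right; exact if_neg h
  -- B = filter (key = 0) ++ filter (key = 1)
  have hB := foldl_insertBy_binary key hk categories [] [] (by simp) (by simp)
  simp only [List.nil_append, List.append_nil] at hB
  rw [PySem.List.sorted_eq_foldl_insertBy, hB]
  -- A's loop body, rewritten through rootTest_eq, is an if on (key = 0)
  have hbody : ∀ (rc : List (List (String × Int)) × List (List (String × Int))) cat,
      (let parent_id := (PySem.Dict.mk cat).get? "parent_id"
       if parent_id == none || parent_id == some 0 ||
          !((categories.foldl (fun d cat => d.insert ((PySem.Dict.mk cat).get? "id") cat)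
              (PySem.Dict.empty : PySem.Dict (Option Int) (List (String × Int)))).contains parent_id)
       then (rc.1 ++ [cat], rc.2) else (rc.1, rc.2 ++ [cat]))
      = (if key cat == 0 then (rc.1 ++ [cat], rc.2) else (rc.1, rc.2 ++ [cat])) := by
    intro rc cat
    simp only [hkey, rootTest_eq]
    by_cases h : ((PySem.Dict.mk cat).get? "parent_id" == none || (PySem.Dict.mk cat).get? "parent_id" == some 0 ||
        !((PySem.Set.ofList (categories.map (fun cat => (PySem.Dict.mk cat).get? "id"))).contains ((PySem.Dict.mk cat).get? "parent_id"))) = true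
    · rw [if_pos h, if_pos h]; norm_num
    · rw [if_neg h, if_neg h]; norm_num
  simp only [hbody]
  rw [foldl_pair_append_if (fun cat => key cat == 0) categories [] []]
  simp only [List.nil_append]
  congr 1
  apply List.filter_congr; intro x _
  rcases hk x with h | h <;> simp [h]
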